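-- pv_equiv track=rewrite | github.com/mcstabface/mk1-doc-conversion | tools/run_query_eval.py | extract_top_results_section
-- ===== SOURCE A (Python) =====
-- def extract_top_results_section(output: str) -> str:
--     lines = output.splitlines()
--     capture = False
--     captured = []
--
--     for line in lines:
--         if line.startswith("TOP 5 RESULTS"):
--             capture = True
--         if capture:
--             captured.append(line)
--         if line.startswith("ASSEMBLED CONTEXT"):
--             break
--
--     return "\n".join(captured)
-- ===== SOURCE B (Python) =====
-- def extract_top_results_section(output: str) -> str:
--     lines = output.splitlines()
--     end = next((i for i, l in enumerate(lines) if l.startswith("ASSEMBLED CONTEXT")), None)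
--     prefix = lines if end is None else lines[:end + 1]
--     start = next((i for i, l in enumerate(prefix) if l.startswith("TOP 5 RESULTS")), None)
--     return "" if start is None else "\n".join(prefix[start:])
-- ===== Notes on version B (the rewrite author's own statement) =====
-- stated objective: alternative
-- what changed: Replaces A's single pass with a stateful capture flag and early break by a find-index-then-slice decomposition: locate the first ASSEMBLED CONTEXT line, truncate to it inclusively, locate the first TOP 5 RESULTS line in that prefix, and join the tail slice.
import Mathlib
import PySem

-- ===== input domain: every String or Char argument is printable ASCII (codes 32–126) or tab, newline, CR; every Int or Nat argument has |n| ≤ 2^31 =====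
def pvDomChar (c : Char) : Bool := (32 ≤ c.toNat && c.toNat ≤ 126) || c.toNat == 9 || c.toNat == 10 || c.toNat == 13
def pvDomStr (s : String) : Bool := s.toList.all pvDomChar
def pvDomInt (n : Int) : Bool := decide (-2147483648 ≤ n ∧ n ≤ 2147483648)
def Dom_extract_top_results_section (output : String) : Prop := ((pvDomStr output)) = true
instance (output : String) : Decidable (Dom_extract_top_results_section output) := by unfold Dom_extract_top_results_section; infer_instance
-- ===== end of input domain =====

-- B replaces A's stateful capture-flag loop by find-index-then-slice (same cost; objective: alternative decomposition).

-- ===== PORT A =====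
-- the for-loop with its (capture, captured) state and early break
def extractA_loop : List String → Bool → List String → List String
  | [], _, captured => captured
  | line :: rest, capture, captured =>
    let capture := if PySem.Str.startswith line "TOP 5 RESULTS" then true else capture
    let captured := if capture then captured ++ [line] else captured
    if PySem.Str.startswith line "ASSEMBLED CONTEXT" then captured
    else extractA_loop rest capture captured

def extract_top_results_section (output : String) : String :=
  let lines := PySem.Str.splitlines output
  PySem.Str.join "\n" (extractA_loop lines false [])

-- ===== PORT B =====
def extract_top_results_section_alt (output : String) : String :=
  let lines := PySem.Str.splitlines output
  let pfx := match lines.findIdx? (fun l => PySem.Str.startswith l "ASSEMBLED CONTEXT") with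
    | none => lines
    | some e => lines.take (e + 1)   -- lines[:end+1], end ≥ 0: exact
  match pfx.findIdx? (fun l => PySem.Str.startswith l "TOP 5 RESULTS") with
  | none => ""
  | some s => PySem.Str.join "\n" (pfx.drop s)   -- prefix[start:], start ≥ 0: exact

-- ===== PRECONDITION & SPEC =====
def Spec_extract_top_results_section (output : String) (out : String) : Prop := out = extract_top_results_section_alt output
instance (output : String) (out : String) : Decidable (Spec_extract_top_results_section output out) := by unfold Spec_extract_top_results_section; infer_instance

-- ===== CLAIM (what is proved, stated in full; the proofs are below) =====
def Claim_equal_extract_top_results_section : Prop := ∀ (output : String), Dom_extract_top_results_section output → Spec_extract_top_results_section output (extract_top_results_section output)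

-- ===== LEMMAS AND PROOFS =====

-- all lines up to and including the first ASSEMBLED line (what A's loop appends once capture is on)
def capAll : List String → List String
  | [] => []
  | l :: rest =>
    if PySem.Str.startswith l "ASSEMBLED CONTEXT" then [l] else l :: capAll rest

-- what A's loop appends while capture is still off
def capNone : List String → List String
  | [] => []
  | l :: rest =>
    if PySem.Str.startswith l "TOP 5 RESULTS" then
      (if PySem.Str.startswith l "ASSEMBLED CONTEXT" then [l] else l :: capAll rest)
    else
      (if PySem.Str.startswith l "ASSEMBLED CONTEXT" then [] else capNone rest)

theorem extractA_loop_true (L : List String) (acc : List String) :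
    extractA_loop L true acc = acc ++ capAll L := by
  induction L generalizing acc with
  | nil => simp [extractA_loop, capAll]
  | cons l rest ih =>
    simp only [extractA_loop, capAll, ite_self]
    by_cases hA : PySem.Str.startswith l "ASSEMBLED CONTEXT"
    · simp only [hA, ite_true]
    · simp only [hA]
      simp [ih]

theorem extractA_loop_false (L : List String) (acc : List String) :
    extractA_loop L false acc = acc ++ capNone L := by
  induction L generalizing acc with
  | nil => simp [extractA_loop, capNone]
  | cons l rest ih =>
    simp only [extractA_loop, capNone]
    by_cases hT : PySem.Str.startswith l "TOP 5 RESULTS" <;>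
      by_cases hA : PySem.Str.startswith l "ASSEMBLED CONTEXT" <;>
        simp only [hT, hA, ite_true] <;>
          simp [ih, extractA_loop_true]

-- B's truncated prefix is capAll
theorem prefixOf_eq_capAll (L : List String) :
    (match L.findIdx? (fun l => PySem.Str.startswith l "ASSEMBLED CONTEXT") with
      | none => L
      | some e => L.take (e + 1)) = capAll L := by
  induction L with
  | nil => simp [capAll]
  | cons l rest ih =>
    by_cases hA : PySem.Str.startswith l "ASSEMBLED CONTEXT"
    · simp only [List.findIdx?_cons, hA, capAll, ite_true, List.take_succ_cons,
        List.take_zero]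
    · simp only [List.findIdx?_cons, hA, capAll]
      cases h : rest.findIdx? (fun l => PySem.Str.startswith l "ASSEMBLED CONTEXT") with
      | none =>
        simp only [h] at ih
        simp only [Option.map_none]
        exact congrArg (l :: ·) ih
      | some e =>
        simp only [h] at ih
        simp only [Option.map_some, List.take_succ_cons]
        exact congrArg (l :: ·) ih

-- B's find-TOP5-then-drop on capAll is capNone
theorem bcore_eq_capNone (L : List String) :
    (match (capAll L).findIdx? (fun l => PySem.Str.startswith l "TOP 5 RESULTS") with
      | none => ([] : List String)
      | some s => (capAll L).drop s) = capNone L := by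
  induction L with
  | nil => simp [capAll, capNone]
  | cons l rest ih =>
    by_cases hT : PySem.Str.startswith l "TOP 5 RESULTS" <;>
      by_cases hA : PySem.Str.startswith l "ASSEMBLED CONTEXT"
    · simp only [capAll, capNone, hT, hA, ite_true, List.findIdx?_cons,
        List.drop_zero]
    · simp only [capAll, capNone, hT, hA, ite_true, Bool.false_eq_true, ite_false,
        List.findIdx?_cons, List.drop_zero]
    · simp only [capAll, capNone, hT, hA, ite_true, ite_false, List.findIdx?_cons,
        List.findIdx?_nil, Option.map_none, Bool.false_eq_true]
    · simp only [capAll, capNone, hT, hA, Bool.false_eq_true, ite_false,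
        List.findIdx?_cons]
      cases h : (capAll rest).findIdx? (fun l => PySem.Str.startswith l "TOP 5 RESULTS") with
      | none =>
        simp only [h] at ih
        simp only [Option.map_none]
        exact ih
      | some s =>
        simp only [h] at ih
        simp only [Option.map_some, List.drop_succ_cons]
        exact ih

-- ===== VERDICT (by name: the statement is the Claim_ definition above) =====
theorem extract_top_results_section_spec : Claim_equal_extract_top_results_section := by
  intro output _
  unfold Spec_extract_top_results_section extract_top_results_section extract_top_results_section_alt
  simp only []
  rw [extractA_loop_false, List.nil_append, prefixOf_eq_capAll, ← bcore_eq_capNone]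
  cases h : (capAll (PySem.Str.splitlines output)).findIdx?
      (fun l => PySem.Str.startswith l "TOP 5 RESULTS") with
  | none => simp [PySem.Str.join]
  | some s => simp
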